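-- pv_equiv track=rewrite | github.com/emiliamajdys/prg-basics | 04-Functions/7-18.py | f
-- ===== SOURCE A (Python) =====
-- def f(number):
--
--     str_number = str(number)
--     digit_count = {}
--
--
--     for digit in str_number:
--         if digit in digit_count:
--             digit_count[digit] += 1
--         else:
--             digit_count[digit] = 1
--
--
--     repeated_sum = sum(int(digit) * count for digit, count in digit_count.items() if count > 1)
--
--     return repeated_sum
-- ===== SOURCE B (Python) =====
-- def f(number):
--     s = sorted(str(number))
--     total = 0
--     i = 0
--     n = len(s)
--     while i < n:
--         j = i
--         while j < n and s[j] == s[i]: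
--             j += 1
--         if j - i > 1:
--             total += int(s[i]) * (j - i)
--         i = j
--     return total
-- ===== Notes on version B (the rewrite author's own statement) =====
-- stated objective: alternative
-- what changed: Replaces the hash-map counting pass plus filtered item scan by sorting the digit string and summing run-lengths of equal characters in one sorted-sequence scan (int() applied only to runs of length > 1, so '-' is never converted).
import Mathlib
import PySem

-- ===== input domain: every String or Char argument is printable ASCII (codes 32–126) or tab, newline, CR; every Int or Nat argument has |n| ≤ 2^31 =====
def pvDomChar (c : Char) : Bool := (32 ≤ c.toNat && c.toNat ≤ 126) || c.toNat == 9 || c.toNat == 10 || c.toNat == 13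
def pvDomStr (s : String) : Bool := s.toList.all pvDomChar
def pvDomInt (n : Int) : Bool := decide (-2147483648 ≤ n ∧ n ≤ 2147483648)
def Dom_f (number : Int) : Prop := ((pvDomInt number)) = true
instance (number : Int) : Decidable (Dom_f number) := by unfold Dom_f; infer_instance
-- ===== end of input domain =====

-- B sums run-lengths of a sorted copy of str(number) instead of A's dict-counting pass; same values (alternative decomposition).

-- int(digit) for a one-character string; the `getD 0` default is unreachable in both
-- programs: int() is only applied to characters with count > 1 in str(number), which are digits.
def pvIntOf (c : Char) : Int := (PySem.Int.ofChars? [c]).getD 0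

-- ===== PORT A =====
def f (number : Int) : Int :=
  let strNumber := PySem.Int.toChars number
  let digitCount := strNumber.foldl (fun d c =>
      if d.contains c then d.insert c (d.getD c 0 + 1) else d.insert c 1)
    (PySem.Dict.empty)
  (((digitCount.items.filter (fun p => p.2 > 1)).map (fun p => pvIntOf p.1 * p.2)).sum)

-- ===== PORT B =====
-- run-length scan of the sorted character list (the two nested while loops of Source B)
def pvRuns : List Char → Int
  | [] => 0
  | c :: rest =>
      let run : Int := 1 + (rest.takeWhile (fun x => x == c)).length
      (if run > 1 then pvIntOf c * run else 0) + pvRuns (rest.dropWhile (fun x => x == c))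
termination_by l => l.length
decreasing_by
  exact Nat.lt_succ_of_le (List.length_dropWhile_le _ _)

def f_alt (number : Int) : Int :=
  pvRuns (PySem.List.sorted (PySem.Int.toChars number) (fun c => c) false)

-- ===== PRECONDITION & SPEC =====
def Spec_f (number : Int) (out : Int) : Prop := out = f_alt number
instance (number : Int) (out : Int) : Decidable (Spec_f number out) := by unfold Spec_f; infer_instance

-- ===== CLAIM (what is proved, stated in full; the proofs are below) =====
def Claim_equal_f : Prop := ∀ (number : Int), Dom_f number → Spec_f number (f number)

-- ===== LEMMAS AND PROOFS =====

-- the per-character contribution: intOf c * count, kept only for counts > 1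
def pvTerm (s : List Char) (c : Char) : Int :=
  if (1 : Int) < (s.count c : Int) then pvIntOf c * (s.count c : Int) else 0

lemma counter_sum_eq_finset (s : List Char) :
    ((((PySem.Dict.counter s : PySem.Dict Char Int)).items.filter (fun p => p.2 > 1)).map
        (fun p => pvIntOf p.1 * p.2)).sum = ∑ c ∈ s.toFinset, pvTerm s c := by
  rw [PySem.Dict.items_counter]
  rw [List.filter_map, List.map_map]
  have hnd : (PySem.Set.ofList s).Nodup := PySem.Set.nodup_ofList s
  have hnd2 : ((PySem.Set.ofList s).filter
      ((fun (p : Char × Int) => decide (p.2 > 1)) ∘ (fun k => (k, (s.count k : Int))))).Nodup :=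
    hnd.filter _
  rw [← List.sum_toFinset _ hnd2]
  rw [List.toFinset_filter]
  have hfs : (PySem.Set.ofList s).toFinset = s.toFinset := by
    ext x
    simp [List.mem_toFinset, PySem.Set.mem_ofList]
  rw [hfs, Finset.sum_filter]
  apply Finset.sum_congr rfl
  intro c _
  simp only [Function.comp, pvTerm]
  by_cases h : (1 : Int) < (s.count c : Int)
  · simp [h]
  · simp [h]

lemma f_eq_finset (number : Int) :
    f number = ∑ c ∈ (PySem.Int.toChars number).toFinset, pvTerm (PySem.Int.toChars number) c := by
  unfold f
  have hstep : (fun (d : PySem.Dict Char Int) c =>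
      if d.contains c then d.insert c (d.getD c 0 + 1) else d.insert c 1)
      = fun (d : PySem.Dict Char Int) c => d.insert c (d.getD c 0 + 1) := by
    funext d c
    rcases hc : d.contains c with _ | _
    · have h0 : d.getD c 0 = 0 := PySem.Dict.getD_of_not_contains d 0 hc
      simp [h0]
    · simp
  simp only [hstep, PySem.Dict.foldl_insert_getD_add_one_eq_counter]
  exact counter_sum_eq_finset _

lemma pvRuns_sorted (t : List Char) (h : t.Pairwise (· ≤ ·)) :
    pvRuns t = ∑ c ∈ t.toFinset, pvTerm t c := by
  induction t using pvRuns.induct with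
  | case1 => simp [pvRuns]
  | case2 c rest ih =>
    have hrest : rest.Pairwise (· ≤ ·) := (List.pairwise_cons.mp h).2
    have hle : ∀ x ∈ rest, c ≤ x := (List.pairwise_cons.mp h).1
    set tw := rest.takeWhile (fun x => x == c) with htw
    set u := rest.dropWhile (fun x => x == c) with hu
    have hsplit : tw ++ u = rest := List.takeWhile_append_dropWhile
    have htwc : ∀ x ∈ tw, x = c := by
      intro x hx
      have := List.mem_takeWhile_imp hx
      exact eq_of_beq this
    have hcu : c ∉ u := by
      intro hc
      cases hhead : u with
      | nil => simp [hhead] at hc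
      | cons hd us =>
        have hph : ¬ (hd == c) = true := by
          have := List.head?_dropWhile_not (fun x => x == c) rest
          rw [← hu, hhead] at this
          simpa using this
        have hhd : hd ≠ c := by simpa using hph
        have hmemrest : ∀ x ∈ u, x ∈ rest := by
          intro x hx
          rw [← hsplit]; exact List.mem_append_right _ hx
        have hupw : u.Pairwise (· ≤ ·) := hrest.sublist (List.dropWhile_sublist _)
        rw [hhead] at hc
        rcases List.mem_cons.mp hc with rfl | hc'
        · exact hhd rfl
        · -- c ∈ us, but hd ≤ c and c ≤ hd gives hd = c
          have h1 : hd ≤ c := by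
            rw [hhead] at hupw
            exact (List.pairwise_cons.mp hupw).1 c hc'
          have h2 : c ≤ hd := hle hd (hmemrest hd (by rw [hhead]; exact List.mem_cons_self))
          exact hhd (le_antisymm h1 h2)
    have hcount_tw : rest.count c = tw.length := by
      rw [← hsplit, List.count_append]
      have h1 : tw.count c = tw.length := by
        apply List.count_eq_length.mpr
        intro x hx; exact ((htwc x hx).symm)
      have h2 : u.count c = 0 := List.count_eq_zero.mpr hcu
      omega
    have hcnt : (c :: rest).count c = 1 + tw.length := by
      rw [List.count_cons_self, hcount_tw]; omega
    have hfs : (c :: rest).toFinset = insert c u.toFinset := by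
      ext x
      simp only [List.mem_toFinset, List.mem_cons, Finset.mem_insert]
      constructor
      · rintro (rfl | hx)
        · exact Or.inl rfl
        · rw [← hsplit] at hx
          rcases List.mem_append.mp hx with hx | hx
          · exact Or.inl (htwc x hx)
          · exact Or.inr hx
      · rintro (rfl | hx)
        · exact Or.inl rfl
        · right; rw [← hsplit]; exact List.mem_append_right _ hx
    have hcnotin : c ∉ u.toFinset := by simpa [List.mem_toFinset] using hcu
    have hcount_u : ∀ x ∈ u, (c :: rest).count x = u.count x := by
      intro x hx
      have hxc : x ≠ c := fun hxe => hcu (hxe ▸ hx)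
      have htwx : tw.count x = 0 := List.count_eq_zero.mpr (fun hmem => hxc (htwc x hmem))
      rw [← hsplit]
      simp [List.count_append, htwx, Ne.symm hxc]
    rw [pvRuns]
    have hupw : u.Pairwise (· ≤ ·) := hrest.sublist (List.dropWhile_sublist _)
    rw [hfs, Finset.sum_insert hcnotin]
    have hterm : (if (1 : Int) + ((rest.takeWhile (fun x => x == c)).length : Int) > 1 then
        pvIntOf c * ((1 : Int) + ((rest.takeWhile (fun x => x == c)).length : Int)) else 0)
        = pvTerm (c :: rest) c := by
      simp only [pvTerm, hcnt]
      push_cast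
      split_ifs <;> rfl
    have hsum : ∑ x ∈ u.toFinset, pvTerm (c :: rest) x = ∑ x ∈ u.toFinset, pvTerm u x := by
      apply Finset.sum_congr rfl
      intro x hx
      have hxu : x ∈ u := List.mem_toFinset.mp hx
      simp only [pvTerm, hcount_u x hxu]
    rw [hsum, ← ih hupw]
    simp only [← htw, ← hu] at *
    rw [hterm]

-- ===== VERDICT (by name: the statement is the Claim_ definition above) =====
theorem f_spec : Claim_equal_f := by
  intro number _
  unfold Spec_f f_alt
  set s := PySem.Int.toChars number with hs
  set t := PySem.List.sorted s (fun c => c) false with ht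
  have hperm : t.Perm s := PySem.List.sorted_perm s _ false
  have hpw : t.Pairwise (· ≤ ·) := PySem.List.sorted_pairwise s (fun c => c)
  rw [f_eq_finset]
  rw [pvRuns_sorted t hpw]
  rw [List.toFinset_eq_of_perm _ _ hperm]
  apply Finset.sum_congr rfl
  intro c _
  simp only [pvTerm, hperm.count_eq]
  rfl
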